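-- pv_equiv track=rewrite | github.com/QuentinDuval/PythonExperiments | greedy/CoinPiles.py | min_removal_dp2
-- ===== SOURCE A (Python) =====
-- def min_removal_dp2(heights, k):
--     if not heights:
--         return 0
--
--     heights.sort()
--
--     n = len(heights)
--     memo = [0] * n
--     for delta in range(1, n):
--         new_memo = [0] * n
--         for i in range(n - delta):
--             j = i + delta
--             if heights[j] - heights[i] <= k:
--                 new_memo[i] = 0
--             else:
--                 drop_left = heights[i] + memo[i+1]
--                 pop_right = memo[i] + heights[j] - (heights[i] + k)
--                 new_memo[i] = min(drop_left, pop_right)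
--         memo = new_memo
--     return memo[0]
-- ===== SOURCE B (Python) =====
-- def min_removal_dp2(heights, k):
--     hs = sorted(heights)
--     n = len(hs)
--     if n == 0:
--         return 0
--     suffix = [0] * (n + 1)
--     for i in range(n - 1, -1, -1):
--         suffix[i] = suffix[i + 1] + hs[i]
--     best = None
--     pref = 0
--     m = 0  # first index with hs[m] > cap; caps are nondecreasing, so m only moves right
--     for t in range(n):
--         cap = hs[t] + k
--         while m < n and hs[m] <= cap:
--             m += 1
--         e = m if m > t + 1 else t + 1
--         c = pref + suffix[e] - cap * (n - e)
--         if best is None or c < best: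
--             best = c
--         if hs[n - 1] - hs[t] <= k:
--             break  # remaining piles already fit within k; dropping more cannot be required
--         pref += hs[t]
--     return best
-- ===== Notes on version B (the rewrite author's own statement) =====
-- stated objective: faster
-- what changed: Replaces the O(n^2) interval DP over all (i,j) diagonals by a single sorted scan: for each candidate lowest surviving pile t (scanned only until the remaining range first fits within k) the cost is prefix-sum of dropped piles plus, via suffix sums and a monotone two-pointer threshold, the total trim of piles above hs[t]+k.
import Mathlib
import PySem

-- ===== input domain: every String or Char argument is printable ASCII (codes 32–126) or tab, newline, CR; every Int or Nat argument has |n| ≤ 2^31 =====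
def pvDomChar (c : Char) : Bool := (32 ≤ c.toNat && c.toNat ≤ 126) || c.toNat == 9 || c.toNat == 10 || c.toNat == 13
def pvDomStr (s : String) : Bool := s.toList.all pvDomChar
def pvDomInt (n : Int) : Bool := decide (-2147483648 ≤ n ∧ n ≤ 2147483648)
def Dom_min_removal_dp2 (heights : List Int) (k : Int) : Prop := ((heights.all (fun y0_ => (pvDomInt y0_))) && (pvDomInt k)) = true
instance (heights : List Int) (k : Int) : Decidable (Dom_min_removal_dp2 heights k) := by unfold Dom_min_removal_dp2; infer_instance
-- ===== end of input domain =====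

-- B replaces A's O(n^2) interval DP by one sorted scan with suffix sums and a monotone
-- threshold pointer (objective: faster).  A sorts `heights` in place; B does not mutate its
-- argument — the equivalence proved here is about the return value only.


-- ===== PORT A =====
-- literal transliteration of A: sort, then the diagonal-by-diagonal interval DP with a rolling array
def min_removal_dp2 (heights : List Int) (k : Int) : Int :=
  if heights = [] then 0
  else
    let hs := PySem.List.sorted heights (fun x => x) false
    let n := hs.length
    let memo0 : List Int := List.replicate n 0
    let memo := (PySem.List.pyRange 1 (n : Int) 1).foldl (fun memo delta =>
      (PySem.List.pyRange 0 ((n : Int) - delta) 1).foldl (fun new_memo i =>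
        let j := i + delta
        let v : Int :=
          if PySem.List.pyGetD hs j 0 - PySem.List.pyGetD hs i 0 ≤ k then 0
          else
            let drop_left := PySem.List.pyGetD hs i 0 + PySem.List.pyGetD memo (i+1) 0
            let pop_right := PySem.List.pyGetD memo i 0 + PySem.List.pyGetD hs j 0 - (PySem.List.pyGetD hs i 0 + k)
            min drop_left pop_right
        new_memo.set i.toNat v) (List.replicate n 0)) memo0
    PySem.List.pyGetD memo 0 0

-- ===== PORT B =====
-- while m < n and hs[m] <= cap: m += 1
def pvAltAdvance (hs : List Int) (cap : Int) (n m : Nat) : Nat :=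
  if m < n then
    (if PySem.List.pyGetD hs (m : Int) 0 ≤ cap then pvAltAdvance hs cap n (m+1) else m)
  else m
termination_by n - m

-- the 'for t in range(n)' loop of Source B with its break, as structural recursion on n - t
def pvAltLoop (hs suffix : List Int) (k : Int) (n t : Nat) (pref : Int) (m : Nat) (best : Option Int) : Int :=
  if t < n then
    let cap := PySem.List.pyGetD hs (t : Int) 0 + k
    let m' := pvAltAdvance hs cap n m
    let e : Nat := if t + 1 < m' then m' else t + 1
    let c := pref + PySem.List.pyGetD suffix (e : Int) 0 - cap * ((n : Int) - (e : Int))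
    let best' : Int := best.elim c (fun b => if c < b then c else b)
    if PySem.List.pyGetD hs ((n : Int) - 1) 0 - PySem.List.pyGetD hs (t : Int) 0 ≤ k then best'
    else pvAltLoop hs suffix k n (t+1) (pref + PySem.List.pyGetD hs (t : Int) 0) m' (some best')
  else best.getD 0   -- with n ≥ 1 the loop body runs at least once, so best is always set here
termination_by n - t

-- literal transliteration of B: sort a copy, suffix sums, one scan over the lowest kept pile
def min_removal_dp2_alt (heights : List Int) (k : Int) : Int :=
  let hs := PySem.List.sorted heights (fun x => x) false
  let n := hs.length
  if n = 0 then 0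
  else
    let suffix := (PySem.List.pyRange ((n : Int) - 1) (-1) (-1)).foldl (fun suffix i =>
      suffix.set i.toNat (PySem.List.pyGetD suffix (i+1) 0 + PySem.List.pyGetD hs i 0))
      (List.replicate (n+1) 0)
    pvAltLoop hs suffix k n 0 0 0 none

-- ===== PRECONDITION & SPEC =====
def Spec_min_removal_dp2 (heights : List Int) (k : Int) (out : Int) : Prop := out = min_removal_dp2_alt heights k
instance (heights : List Int) (k : Int) (out : Int) : Decidable (Spec_min_removal_dp2 heights k out) := by unfold Spec_min_removal_dp2; infer_instance

-- ===== CLAIM (what is proved, stated in full; the proofs are below) =====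
def Claim_equal_min_removal_dp2 : Prop := ∀ (heights : List Int) (k : Int), Dom_min_removal_dp2 heights k → Spec_min_removal_dp2 heights k (min_removal_dp2 heights k)

-- ===== LEMMAS AND PROOFS =====
def pvH (hs : List Int) (s : Nat) : Int := hs.getD s 0
theorem pvH_mono (hs : List Int) (hsort : hs.Pairwise (· ≤ ·)) {a b : Nat}
    (hab : a ≤ b) (hb : b < hs.length) : pvH hs a ≤ pvH hs b := by
  rcases eq_or_lt_of_le hab with rfl | hlt
  · exact le_refl _
  · have := (List.pairwise_iff_getElem).1 hsort a b (by omega) hb hlt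
    simpa [pvH, List.getD_eq_getElem?_getD, List.getElem?_eq_getElem, hb, show a < hs.length by omega] using this
def pvMinR (f : Nat → Int) (i len : Nat) : Int :=
  match len with
  | 0 => f i
  | len + 1 => min (f i) (pvMinR f (i+1) len)
theorem pvMinR_le (f : Nat → Int) (i len t : Nat) (h1 : i ≤ t) (h2 : t ≤ i + len) :
    pvMinR f i len ≤ f t := by
  induction len generalizing i with
  | zero => have : i = t := by omega
            simp [pvMinR, this]
  | succ m ih =>
    simp only [pvMinR]
    rcases eq_or_lt_of_le h1 with rfl | hlt
    · exact min_le_left _ _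
    · exact le_trans (min_le_right _ _) (ih (i+1) (by omega) (by omega))
theorem pvMinR_exists (f : Nat → Int) (i len : Nat) :
    ∃ t, i ≤ t ∧ t ≤ i + len ∧ pvMinR f i len = f t := by
  induction len generalizing i with
  | zero => exact ⟨i, le_refl _, by omega, rfl⟩
  | succ m ih =>
    rcases ih (i+1) with ⟨t, h1, h2, h3⟩
    simp only [pvMinR]
    rcases le_total (f i) (pvMinR f (i+1) m) with h | h
    · exact ⟨i, le_refl _, by omega, by omega⟩
    · exact ⟨t, by omega, by omega, by omega⟩
theorem pvMinR_congr (f g : Nat → Int) (i len : Nat)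
    (h : ∀ t, i ≤ t → t ≤ i + len → f t = g t) : pvMinR f i len = pvMinR g i len := by
  induction len generalizing i with
  | zero => exact h i (le_refl _) (by omega)
  | succ m ih =>
    simp only [pvMinR]
    rw [h i (le_refl _) (by omega), ih (i+1) (fun t a b => h t (by omega) (by omega))]
theorem pvMinR_add_const (f : Nat → Int) (a : Int) (i len : Nat) :
    pvMinR (fun t => a + f t) i len = a + pvMinR f i len := by
  induction len generalizing i with
  | zero => rfl
  | succ m ih => simp only [pvMinR, ih]; omega
theorem pvMinR_append (f : Nat → Int) (i len : Nat) :
    pvMinR f i (len + 1) = min (pvMinR f i len) (f (i + len + 1)) := by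
  induction len generalizing i with
  | zero => simp [pvMinR]
  | succ m ih =>
    have h : i + (m + 1) + 1 = (i + 1) + m + 1 := by omega
    calc pvMinR f i (m+1+1) = min (f i) (pvMinR f (i+1) (m+1)) := rfl
      _ = min (f i) (min (pvMinR f (i+1) m) (f (i+1+m+1))) := by rw [ih]
      _ = min (min (f i) (pvMinR f (i+1) m)) (f (i+1+m+1)) := (min_assoc _ _ _).symm
      _ = min (pvMinR f i (m+1)) (f (i + (m+1) + 1)) := by rw [h]; rfl
def pvT (hs : List Int) (k : Int) (i j : Nat) : Nat :=
  if i < j then (if pvH hs j - pvH hs i ≤ k then i else pvT hs k (i+1) j) else j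
termination_by j - i

theorem pvT_ge (hs : List Int) (k : Int) (i j : Nat) : i ≤ j → i ≤ pvT hs k i j := by
  intro hij
  unfold pvT
  split
  · split
    · exact le_refl _
    · exact le_trans (by omega) (pvT_ge hs k (i+1) j (by omega))
  · exact hij
termination_by j - i

theorem pvT_le (hs : List Int) (k : Int) (i j : Nat) : i ≤ j → pvT hs k i j ≤ j := by
  intro hij
  unfold pvT
  split
  · split
    · omega
    · exact pvT_le hs k (i+1) j (by omega)
  · omega
termination_by j - i

theorem pvT_le_of_feas (hs : List Int) (k : Int) (i j t : Nat)
    (h1 : i ≤ t) (h2 : t ≤ j) (hf : pvH hs j - pvH hs t ≤ k) : pvT hs k i j ≤ t := by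
  unfold pvT
  split
  · split
    · exact h1
    · rcases eq_or_lt_of_le h1 with rfl | h
      · omega
      · exact pvT_le_of_feas hs k (i+1) j t (by omega) h2 hf
  · omega
termination_by j - i

theorem pvT_feas_of_lt (hs : List Int) (k : Int) (i j : Nat) (_hij : i ≤ j)
    (hlt : pvT hs k i j < j) : pvH hs j - pvH hs (pvT hs k i j) ≤ k := by
  by_cases hij2 : i < j
  · rw [pvT.eq_def, if_pos hij2] at hlt ⊢
    by_cases hf : pvH hs j - pvH hs i ≤ k
    · rw [if_pos hf] at hlt ⊢
      exact hf
    · rw [if_neg hf] at hlt ⊢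
      exact pvT_feas_of_lt hs k (i+1) j (by omega) hlt
  · rw [pvT.eq_def, if_neg hij2] at hlt
    omega
termination_by j - i
theorem pvT_mono_j (hs : List Int) (k : Int) (i j : Nat) (hsort : hs.Pairwise (· ≤ ·))
    (hij : i ≤ j - 1) (hj0 : 1 ≤ j) (hj : j < hs.length) :
    pvT hs k i (j - 1) ≤ pvT hs k i j := by
  rcases eq_or_lt_of_le (pvT_le hs k i j (by omega)) with heq | hlt
  · have := pvT_le hs k i (j-1) hij
    omega
  · have hfeas := pvT_feas_of_lt hs k i j (by omega) hlt
    have hmono := pvH_mono hs hsort (show j - 1 ≤ j by omega) hj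
    exact pvT_le_of_feas hs k i (j-1) _ (pvT_ge hs k i j (by omega)) (by omega) (by omega)

def pvPre (hs : List Int) (t : Nat) : Int := ((List.range t).map (pvH hs)).sum
def pvSuf (hs : List Int) (i : Nat) : Int := ((List.range' i (hs.length - i)).map (pvH hs)).sum
def pvExc (hs : List Int) (k : Int) (t j : Nat) : Int :=
  ((List.range' (t+1) (j - t)).map (fun s => max (pvH hs s - pvH hs t - k) 0)).sum

theorem pvPre_succ (hs : List Int) (t : Nat) : pvPre hs (t + 1) = pvPre hs t + pvH hs t := by
  simp [pvPre, List.range_succ]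

theorem pvSuf_succ (hs : List Int) (i : Nat) (hi : i < hs.length) :
    pvSuf hs i = pvH hs i + pvSuf hs (i + 1) := by
  unfold pvSuf
  rw [show hs.length - i = (hs.length - (i+1)) + 1 by omega, List.range'_succ]
  simp

theorem pvExc_last (hs : List Int) (k : Int) (t j : Nat) (htj : t < j) :
    pvExc hs k t j = pvExc hs k t (j - 1) + max (pvH hs j - pvH hs t - k) 0 := by
  unfold pvExc
  rw [show j - t = (j - 1 - t) + 1 by omega, List.range'_concat]
  simp [show t + 1 + (j - 1 - t) = j by omega]

theorem pvExc_zero (hs : List Int) (k : Int) (t j : Nat) (hsort : hs.Pairwise (· ≤ ·))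
    (hj : j < hs.length) (htj : t ≤ j) (hf : pvH hs j - pvH hs t ≤ k) :
    pvExc hs k t j = 0 := by
  unfold pvExc
  apply List.sum_eq_zero
  intro x hx
  simp only [List.mem_map] at hx
  rcases hx with ⟨s, hs1, rfl⟩
  rw [List.mem_range'] at hs1
  rcases hs1 with ⟨p, hp, rfl⟩
  have h1 := pvH_mono hs hsort (show t + 1 + p ≤ j by omega) hj
  have h2 : pvH hs (t + 1 + p) - pvH hs t - k ≤ 0 := by omega
  simp [max_eq_right h2]

theorem pvExc_eq_suf (hs : List Int) (k : Int) (t e : Nat)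
    (ht : t < hs.length) (he1 : t + 1 ≤ e) (he2 : e ≤ hs.length)
    (hlow : ∀ s, t < s → s < e → pvH hs s ≤ pvH hs t + k)
    (hhigh : ∀ s, e ≤ s → s < hs.length → pvH hs t + k < pvH hs s) :
    pvExc hs k t (hs.length - 1) = pvSuf hs e - (pvH hs t + k) * ((hs.length : Int) - e) := by
  unfold pvExc
  have hsplit : List.range' (t+1) (hs.length - 1 - t) =
      List.range' (t+1) (e - (t+1)) ++ List.range' e (hs.length - e) := by
    rw [show hs.length - 1 - t = (e - (t+1)) + (hs.length - e) by omega,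
      ← List.range'_append_1, show t + 1 + (e - (t+1)) = e by omega]
  rw [hsplit, List.map_append, List.sum_append]
  have hlow0 : ((List.range' (t+1) (e - (t+1))).map
      (fun s => max (pvH hs s - pvH hs t - k) 0)).sum = 0 := by
    apply List.sum_eq_zero
    intro x hx
    simp only [List.mem_map] at hx
    rcases hx with ⟨s, hs1, rfl⟩
    rw [List.mem_range'] at hs1
    rcases hs1 with ⟨p, hp, rfl⟩
    have h1 := hlow (t+1+p) (by omega) (by omega)
    have h2 : pvH hs (t+1+p) - pvH hs t - k ≤ 0 := by omega
    simp [max_eq_right h2]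
  rw [hlow0, zero_add]
  have hhi : ((List.range' e (hs.length - e)).map
      (fun s => max (pvH hs s - pvH hs t - k) 0)).sum =
      ((List.range' e (hs.length - e)).map
      (fun s => pvH hs s + (-(pvH hs t + k)))).sum := by
    apply congrArg
    apply List.map_congr_left
    intro s hs1
    rw [List.mem_range'] at hs1
    rcases hs1 with ⟨p, hp, rfl⟩
    simp only [one_mul]
    have h1 := hhigh (e+p) (by omega) (by omega)
    have h2 : 0 ≤ pvH hs (e+p) - pvH hs t - k := by omega
    rw [max_eq_left h2]
    omega
  rw [hhi, PySem.List.sum_map_add_int, PySem.List.sum_map_const_int]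
  unfold pvSuf
  simp
  rw [Nat.cast_sub he2]
  ring
def pvG (hs : List Int) (k : Int) (i j t : Nat) : Int := (pvPre hs t - pvPre hs i) + pvExc hs k t j
def pvC (hs : List Int) (k : Int) (i j : Nat) : Int :=
  if _h : i < j then
    if pvH hs j - pvH hs i ≤ k then 0
    else min (pvH hs i + pvC hs k (i+1) j) (pvC hs k i (j-1) + pvH hs j - pvH hs i - k)
  else 0
termination_by j - i

theorem pvC_eq (hs : List Int) (k : Int) (hsort : hs.Pairwise (· ≤ ·)) (i j : Nat)
    (hij : i ≤ j) (hj : j < hs.length) :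
    pvC hs k i j = pvMinR (pvG hs k i j) i (pvT hs k i j - i) := by
  rcases eq_or_lt_of_le hij with rfl | hlt
  · rw [pvC.eq_def, dif_neg (lt_irrefl i), pvT.eq_def, if_neg (lt_irrefl i)]
    simp [pvMinR, pvG, pvExc]
  · rw [pvC.eq_def, dif_pos hlt, pvT.eq_def, if_pos hlt]
    by_cases hf : pvH hs j - pvH hs i ≤ k
    · rw [if_pos hf, if_pos hf]
      simp only [Nat.sub_self, pvMinR, pvG]
      rw [pvExc_zero hs k i j hsort hj (by omega) hf]
      ring
    · rw [if_neg hf, if_neg hf]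
      set T := pvT hs k (i+1) j with hT
      have hT1 : i + 1 ≤ T := pvT_ge hs k (i+1) j (by omega)
      have hT2 : T ≤ j := pvT_le hs k (i+1) j (by omega)
      rw [show T - i = (T - (i+1)) + 1 by omega]
      have hrhs : pvMinR (pvG hs k i j) i ((T - (i+1)) + 1)
          = min (pvG hs k i j i) (pvMinR (pvG hs k i j) (i+1) (T - (i+1))) := rfl
      rw [hrhs]
      have hshift : ∀ t, pvG hs k i j t = pvH hs i + pvG hs k (i+1) j t := by
        intro t
        unfold pvG
        rw [pvPre_succ]
        ring
      have hX : pvMinR (pvG hs k i j) (i+1) (T - (i+1))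
          = pvH hs i + pvMinR (pvG hs k (i+1) j) (i+1) (T - (i+1)) := by
        rw [pvMinR_congr _ (fun t => pvH hs i + pvG hs k (i+1) j t) _ _
          (fun t _ _ => hshift t), pvMinR_add_const]
      have ih1 := pvC_eq hs k hsort (i+1) j (by omega) hj
      have ih2 := pvC_eq hs k hsort i (j-1) (by omega) (by omega)
      rw [ih1, ih2, hX, ← hT]
      set T₂ := pvT hs k i (j-1) with hT₂def
      have hT₂a : i ≤ T₂ := pvT_ge hs k i (j-1) (by omega)
      have hT₂b : T₂ ≤ j - 1 := pvT_le hs k i (j-1) (by omega)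
      have hT₂T : T₂ ≤ T := by
        have hTT : pvT hs k i j = T := by
          rw [pvT.eq_def, if_pos hlt, if_neg hf]
        have h := pvT_mono_j hs k i j hsort (by omega) (by omega) hj
        rw [hTT] at h
        rw [hT₂def]
        exact h
      set M1 := pvMinR (pvG hs k (i+1) j) (i+1) (T - (i+1)) with hM1
      set M2 := pvMinR (pvG hs k i (j-1)) i (T₂ - i) with hM2
      set gi := pvG hs k i j i with hgi
      have h2 : gi = pvG hs k i (j-1) i + (pvH hs j - pvH hs i - k) := by
        rw [hgi]
        unfold pvG
        rw [pvExc_last hs k i j hlt, max_eq_left (by omega)]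
        ring
      have ha : M2 + (pvH hs j - pvH hs i - k) ≤ gi := by
        have h1 : M2 ≤ pvG hs k i (j-1) i := pvMinR_le _ _ _ i (le_refl _) (by omega)
        omega
      have hb : min gi (pvH hs i + M1) ≤ M2 + (pvH hs j - pvH hs i - k) := by
        rcases pvMinR_exists (pvG hs k i (j-1)) i (T₂ - i) with ⟨t₀, ht01, ht02, ht03⟩
        rw [← hM2] at ht03
        rcases eq_or_lt_of_le ht01 with rfl | ht0i
        · rw [← ht03] at h2
          rw [← h2]
          exact min_le_left _ _
        · have hmem : pvH hs i + M1 ≤ pvG hs k i j t₀ := by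
            rw [← hX]
            exact pvMinR_le _ _ _ t₀ (by omega) (by omega)
          have hle : pvG hs k i j t₀ ≤ M2 + (pvH hs j - pvH hs i - k) := by
            rw [ht03]
            unfold pvG
            rw [pvExc_last hs k t₀ j (by omega)]
            have hmax : max (pvH hs j - pvH hs t₀ - k) 0 ≤ pvH hs j - pvH hs i - k := by
              have hmono := pvH_mono hs hsort (show i ≤ t₀ by omega)
                (show t₀ < hs.length by omega)
              rcases max_cases (pvH hs j - pvH hs t₀ - k) (0:Int) with ⟨he, _⟩ | ⟨he, _⟩ <;> omega
            omega
          exact le_trans (min_le_right _ _) (le_trans hmem hle)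
      have hgoal1 : min (pvH hs i + M1) (M2 + pvH hs j - pvH hs i - k)
          = min (pvH hs i + M1) (M2 + (pvH hs j - pvH hs i - k)) := by
        ring_nf
      rw [hgoal1]
      have hA : min (pvH hs i + M1) (M2 + (pvH hs j - pvH hs i - k)) ≤ min gi (pvH hs i + M1) :=
        le_min (le_trans (min_le_right _ _) ha) (min_le_left _ _)
      have hB : min gi (pvH hs i + M1) ≤ min (pvH hs i + M1) (M2 + (pvH hs j - pvH hs i - k)) :=
        le_min (min_le_right _ _) hb
      omega
termination_by j - i
theorem pvMapRangeGetD (f : Nat → Int) (n i : Nat) :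
    ((List.range n).map f).getD i 0 = if i < n then f i else 0 := by
  by_cases h : i < n
  · rw [List.getD_eq_getElem?_getD]
    simp [h]
  · rw [List.getD_eq_getElem?_getD]
    rw [List.getElem?_eq_none (by simpa using by omega)]
    simp [h]

theorem pvFoldSet (w : Int → Int) (n m : Nat) (hm : m ≤ n) :
    (PySem.List.pyRange 0 (m : Int) 1).foldl (fun l i => l.set i.toNat (w i))
      (List.replicate n (0 : Int))
    = (List.range n).map (fun i => if i < m then w (i : Int) else 0) := by
  induction m with
  | zero =>
    rw [PySem.List.pyRange_one_eq_nil (by omega)]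
    simp [List.map_const']
  | succ m ih =>
    rw [show ((m+1 : Nat) : Int) = (m : Int) + 1 by push_cast; ring,
      PySem.List.pyRange_one_succ_right (by omega), List.foldl_append]
    rw [ih (by omega)]
    simp only [List.foldl_cons, List.foldl_nil, Int.toNat_natCast]
    apply List.ext_getElem
    · simp
    · intro idx h1 h2
      simp only [List.getElem_set, List.getElem_map, List.getElem_range]
      simp only [List.length_set, List.length_map, List.length_range] at h1
      by_cases hidx : m = idx
      · subst hidx
        simp
      · simp [hidx, show idx < m ↔ idx < m + 1 by omega]
def pvMemoAt (hs : List Int) (k : Int) (d : Nat) : List Int :=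
  (List.range hs.length).map (fun i => if i + d < hs.length then pvC hs k i (i + d) else 0)

theorem pvInner (hs : List Int) (k : Int) (δ : Nat) (hδ1 : 1 ≤ δ) (hδ2 : δ ≤ hs.length - 1)
    (h1 : 1 ≤ hs.length) :
    (PySem.List.pyRange 0 ((hs.length : Int) - (δ : Int)) 1).foldl (fun new_memo i =>
        new_memo.set i.toNat
          (if PySem.List.pyGetD hs (i + (δ : Int)) 0 - PySem.List.pyGetD hs i 0 ≤ k then 0
           else min (PySem.List.pyGetD hs i 0 + PySem.List.pyGetD (pvMemoAt hs k (δ-1)) (i+1) 0)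
             (PySem.List.pyGetD (pvMemoAt hs k (δ-1)) i 0 + PySem.List.pyGetD hs (i + (δ : Int)) 0
               - (PySem.List.pyGetD hs i 0 + k))))
      (List.replicate hs.length 0) = pvMemoAt hs k δ := by
  rw [show (hs.length : Int) - (δ : Int) = ((hs.length - δ : Nat) : Int) by
    rw [Nat.cast_sub (by omega)]]
  rw [pvFoldSet _ hs.length (hs.length - δ) (by omega)]
  unfold pvMemoAt
  apply List.map_congr_left
  intro i hi
  rw [List.mem_range] at hi
  by_cases hc : i + δ < hs.length
  · rw [if_pos (by omega), if_pos hc]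
    have e1 : (i : Int) + (δ : Int) = ((i + δ : Nat) : Int) := by push_cast; ring
    have e2 : (i : Int) + 1 = ((i + 1 : Nat) : Int) := by push_cast; ring
    rw [e1, e2]
    simp only [PySem.List.pyGetD_natCast]
    have m1 : ((List.range hs.length).map
        (fun i => if i + (δ - 1) < hs.length then pvC hs k i (i + (δ - 1)) else 0)).getD (i+1) 0
        = pvC hs k (i+1) (i+δ) := by
      rw [pvMapRangeGetD, if_pos (by omega), if_pos (by omega),
        show i + 1 + (δ - 1) = i + δ by omega]
    have m2 : ((List.range hs.length).map
        (fun i => if i + (δ - 1) < hs.length then pvC hs k i (i + (δ - 1)) else 0)).getD i 0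
        = pvC hs k i (i + δ - 1) := by
      rw [pvMapRangeGetD, if_pos (by omega), if_pos (by omega),
        show i + (δ - 1) = i + δ - 1 by omega]
    rw [m1, m2]
    rw [pvC.eq_def (hs := hs) (i := i) (j := i + δ), dif_pos (by omega)]
    unfold pvH
    by_cases hf : hs.getD (i + δ) 0 - hs.getD i 0 ≤ k
    · rw [if_pos hf, if_pos hf]
    · rw [if_neg hf, if_neg hf]
      congr 1
      ring
  · rw [if_neg (by omega), if_neg hc]
theorem pvOuterFold (hs : List Int) (k : Int) (h1 : 1 ≤ hs.length) (d : Nat)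
    (hd : d ≤ hs.length - 1) :
    (PySem.List.pyRange 1 ((d : Int) + 1) 1).foldl (fun memo delta =>
      (PySem.List.pyRange 0 ((hs.length : Int) - delta) 1).foldl (fun new_memo i =>
        new_memo.set i.toNat
          (if PySem.List.pyGetD hs (i + delta) 0 - PySem.List.pyGetD hs i 0 ≤ k then 0
           else min (PySem.List.pyGetD hs i 0 + PySem.List.pyGetD memo (i+1) 0)
             (PySem.List.pyGetD memo i 0 + PySem.List.pyGetD hs (i + delta) 0
               - (PySem.List.pyGetD hs i 0 + k))))
        (List.replicate hs.length 0)) (List.replicate hs.length 0) = pvMemoAt hs k d := by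
  induction d with
  | zero =>
    rw [show ((0 : Nat) : Int) + 1 = 1 by ring, PySem.List.pyRange_one_eq_nil (by omega)]
    simp only [List.foldl_nil]
    unfold pvMemoAt
    apply List.ext_getElem
    · simp
    · intro idx hl1 hl2
      simp only [List.getElem_replicate, List.getElem_map, List.getElem_range]
      rw [pvC.eq_def]
      simp
  | succ d ih =>
    rw [show ((d + 1 : Nat) : Int) + 1 = ((d : Int) + 1) + 1 by push_cast; ring,
      PySem.List.pyRange_one_succ_right (by omega), List.foldl_append]
    rw [ih (by omega)]
    simp only [List.foldl_cons, List.foldl_nil]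
    have h := pvInner hs k (d + 1) (by omega) (by omega) h1
    rw [show ((d + 1 : Nat) : Int) = (d : Int) + 1 by push_cast; ring] at h
    simp only [Nat.add_sub_cancel] at h
    exact h

theorem pvOuterFold' (hs : List Int) (k : Int) (h1 : 1 ≤ hs.length) :
    (PySem.List.pyRange 1 ((hs.length : Int)) 1).foldl (fun memo delta =>
      (PySem.List.pyRange 0 ((hs.length : Int) - delta) 1).foldl (fun new_memo i =>
        new_memo.set i.toNat
          (if PySem.List.pyGetD hs (i + delta) 0 - PySem.List.pyGetD hs i 0 ≤ k then 0
           else min (PySem.List.pyGetD hs i 0 + PySem.List.pyGetD memo (i+1) 0)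
             (PySem.List.pyGetD memo i 0 + PySem.List.pyGetD hs (i + delta) 0
               - (PySem.List.pyGetD hs i 0 + k))))
        (List.replicate hs.length 0)) (List.replicate hs.length 0)
      = pvMemoAt hs k (hs.length - 1) := by
  have h := pvOuterFold hs k h1 (hs.length - 1) (le_refl _)
  rw [show ((hs.length - 1 : Nat) : Int) + 1 = (hs.length : Int) by
    rw [Nat.cast_sub (by omega)]; ring] at h
  exact h

theorem portA_eq (heights : List Int) (k : Int) (hne : heights ≠ []) :
    min_removal_dp2 heights k =
      pvC (PySem.List.sorted heights (fun x => x) false) k 0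
        ((PySem.List.sorted heights (fun x => x) false).length - 1) := by
  unfold min_removal_dp2
  rw [if_neg hne]
  set hs := PySem.List.sorted heights (fun x => x) false with hhs
  have h1 : 1 ≤ hs.length := by
    rw [hhs, PySem.List.length_sorted]
    exact List.length_pos_iff.2 hne
  show PySem.List.pyGetD ((PySem.List.pyRange 1 ((hs.length : Int)) 1).foldl (fun memo delta =>
      (PySem.List.pyRange 0 ((hs.length : Int) - delta) 1).foldl (fun new_memo i =>
        new_memo.set i.toNat
          (if PySem.List.pyGetD hs (i + delta) 0 - PySem.List.pyGetD hs i 0 ≤ k then 0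
           else min (PySem.List.pyGetD hs i 0 + PySem.List.pyGetD memo (i+1) 0)
             (PySem.List.pyGetD memo i 0 + PySem.List.pyGetD hs (i + delta) 0
               - (PySem.List.pyGetD hs i 0 + k))))
        (List.replicate hs.length 0)) (List.replicate hs.length 0)) 0 0
    = pvC hs k 0 (hs.length - 1)
  rw [pvOuterFold' hs k h1]
  rw [show (0 : Int) = ((0 : Nat) : Int) by simp, PySem.List.pyGetD_natCast]
  unfold pvMemoAt
  simp only [Nat.cast_zero]
  rw [pvMapRangeGetD, if_pos (by omega), if_pos (by omega)]
  simp

-- ---- port B computes the scan minimum ----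
def pvSufPartial (hs : List Int) (i : Nat) : List Int :=
  (List.range (hs.length + 1)).map (fun s => if i ≤ s then pvSuf hs s else 0)

theorem pvSufPartial_top (hs : List Int) :
    List.replicate (hs.length + 1) (0 : Int) = pvSufPartial hs hs.length := by
  apply List.ext_getElem
  · simp [pvSufPartial]
  · intro idx h1 h2
    simp only [List.getElem_replicate, pvSufPartial, List.getElem_map, List.getElem_range]
    simp only [List.length_replicate] at h1
    by_cases hc : hs.length ≤ idx
    · have hidx : idx = hs.length := by omega
      subst hidx
      simp [pvSuf]
    · simp [hc]

theorem pvSufFold (hs : List Int) (i : Nat) (hi : i ≤ hs.length) :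
    (PySem.List.pyRange ((i : Int) - 1) (-1) (-1)).foldl (fun suffix j =>
        suffix.set j.toNat
          (PySem.List.pyGetD suffix (j+1) 0 + PySem.List.pyGetD hs j 0))
      (pvSufPartial hs i) = pvSufPartial hs 0 := by
  induction i with
  | zero =>
    rw [show ((0 : Nat) : Int) - 1 = -1 by ring, PySem.List.pyRange_neg_one_eq_nil (by omega)]
    simp
  | succ i ih =>
    rw [show ((i + 1 : Nat) : Int) - 1 = (i : Int) by push_cast; ring,
      PySem.List.pyRange_neg_one_cons (by omega)]
    simp only [List.foldl_cons]
    have hstep : (pvSufPartial hs (i+1)).set ((i : Int)).toNat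
        (PySem.List.pyGetD (pvSufPartial hs (i+1)) ((i : Int) + 1) 0
          + PySem.List.pyGetD hs (i : Int) 0) = pvSufPartial hs i := by
      rw [show ((i : Int)) + 1 = ((i + 1 : Nat) : Int) by push_cast; ring,
        PySem.List.pyGetD_natCast, PySem.List.pyGetD_natCast, Int.toNat_natCast]
      unfold pvSufPartial
      rw [pvMapRangeGetD, if_pos (by omega), if_pos (by omega)]
      apply List.ext_getElem
      · simp
      · intro idx h1 h2
        simp only [List.getElem_set, List.getElem_map, List.getElem_range]
        by_cases hc : i = idx
        · subst hc
          rw [if_pos rfl, if_pos (le_refl i)]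
          rw [pvSuf_succ hs i (by omega)]
          unfold pvH
          ring
        · rw [if_neg hc]
          have hiff : (i + 1 ≤ idx) ↔ (i ≤ idx) := by omega
          simp [hiff]
    rw [hstep, ih (by omega)]
theorem pvAdvance_spec (hs : List Int) (cap : Int) (n m : Nat) (hn : n = hs.length)
    (hm : m ≤ n) (hinv : ∀ idx, idx < m → pvH hs idx ≤ cap) :
    m ≤ pvAltAdvance hs cap n m ∧ pvAltAdvance hs cap n m ≤ n ∧
      (∀ idx, idx < pvAltAdvance hs cap n m → pvH hs idx ≤ cap) ∧
      (pvAltAdvance hs cap n m < n → cap < pvH hs (pvAltAdvance hs cap n m)) := by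
  rw [pvAltAdvance.eq_def]
  by_cases h1 : m < n
  · rw [if_pos h1]
    by_cases h2 : PySem.List.pyGetD hs (m : Int) 0 ≤ cap
    · rw [if_pos h2]
      have hnew : ∀ idx, idx < m + 1 → pvH hs idx ≤ cap := by
        intro idx hidx
        by_cases hc : idx < m
        · exact hinv idx hc
        · have : idx = m := by omega
          subst this
          rw [PySem.List.pyGetD_natCast] at h2
          exact h2
      have := pvAdvance_spec hs cap n (m+1) hn (by omega) hnew
      exact ⟨by omega, this.2.1, this.2.2.1, this.2.2.2⟩
    · rw [if_neg h2]
      rw [PySem.List.pyGetD_natCast] at h2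
      exact ⟨le_refl _, hm, hinv, fun _ => by unfold pvH; omega⟩
  · rw [if_neg h1]
    exact ⟨le_refl _, hm, hinv, fun h => absurd h h1⟩
termination_by n - m

theorem pvAltLoop_step (hs suffix : List Int) (k : Int) (n t : Nat) (pref : Int) (m : Nat)
    (best : Option Int) (ht : t < n) :
    pvAltLoop hs suffix k n t pref m best =
      (if PySem.List.pyGetD hs ((n : Int) - 1) 0 - PySem.List.pyGetD hs (t : Int) 0 ≤ k then
        best.elim (pref + PySem.List.pyGetD suffix
          (((if t + 1 < pvAltAdvance hs (PySem.List.pyGetD hs (t : Int) 0 + k) n m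
             then pvAltAdvance hs (PySem.List.pyGetD hs (t : Int) 0 + k) n m
             else t + 1) : Nat) : Int) 0
          - (PySem.List.pyGetD hs (t : Int) 0 + k) * ((n : Int)
            - ((if t + 1 < pvAltAdvance hs (PySem.List.pyGetD hs (t : Int) 0 + k) n m
                then pvAltAdvance hs (PySem.List.pyGetD hs (t : Int) 0 + k) n m
                else t + 1 : Nat) : Int))) (fun b => if (pref + PySem.List.pyGetD suffix
          (((if t + 1 < pvAltAdvance hs (PySem.List.pyGetD hs (t : Int) 0 + k) n m
             then pvAltAdvance hs (PySem.List.pyGetD hs (t : Int) 0 + k) n m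
             else t + 1) : Nat) : Int) 0
          - (PySem.List.pyGetD hs (t : Int) 0 + k) * ((n : Int)
            - ((if t + 1 < pvAltAdvance hs (PySem.List.pyGetD hs (t : Int) 0 + k) n m
                then pvAltAdvance hs (PySem.List.pyGetD hs (t : Int) 0 + k) n m
                else t + 1 : Nat) : Int))) < b then (pref + PySem.List.pyGetD suffix
          (((if t + 1 < pvAltAdvance hs (PySem.List.pyGetD hs (t : Int) 0 + k) n m
             then pvAltAdvance hs (PySem.List.pyGetD hs (t : Int) 0 + k) n m
             else t + 1) : Nat) : Int) 0
          - (PySem.List.pyGetD hs (t : Int) 0 + k) * ((n : Int)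
            - ((if t + 1 < pvAltAdvance hs (PySem.List.pyGetD hs (t : Int) 0 + k) n m
                then pvAltAdvance hs (PySem.List.pyGetD hs (t : Int) 0 + k) n m
                else t + 1 : Nat) : Int))) else b)
       else
        pvAltLoop hs suffix k n (t+1) (pref + PySem.List.pyGetD hs (t : Int) 0)
          (pvAltAdvance hs (PySem.List.pyGetD hs (t : Int) 0 + k) n m)
          (some (best.elim (pref + PySem.List.pyGetD suffix
          (((if t + 1 < pvAltAdvance hs (PySem.List.pyGetD hs (t : Int) 0 + k) n m
             then pvAltAdvance hs (PySem.List.pyGetD hs (t : Int) 0 + k) n m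
             else t + 1) : Nat) : Int) 0
          - (PySem.List.pyGetD hs (t : Int) 0 + k) * ((n : Int)
            - ((if t + 1 < pvAltAdvance hs (PySem.List.pyGetD hs (t : Int) 0 + k) n m
                then pvAltAdvance hs (PySem.List.pyGetD hs (t : Int) 0 + k) n m
                else t + 1 : Nat) : Int))) (fun b => if (pref + PySem.List.pyGetD suffix
          (((if t + 1 < pvAltAdvance hs (PySem.List.pyGetD hs (t : Int) 0 + k) n m
             then pvAltAdvance hs (PySem.List.pyGetD hs (t : Int) 0 + k) n m
             else t + 1) : Nat) : Int) 0
          - (PySem.List.pyGetD hs (t : Int) 0 + k) * ((n : Int)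
            - ((if t + 1 < pvAltAdvance hs (PySem.List.pyGetD hs (t : Int) 0 + k) n m
                then pvAltAdvance hs (PySem.List.pyGetD hs (t : Int) 0 + k) n m
                else t + 1 : Nat) : Int))) < b then (pref + PySem.List.pyGetD suffix
          (((if t + 1 < pvAltAdvance hs (PySem.List.pyGetD hs (t : Int) 0 + k) n m
             then pvAltAdvance hs (PySem.List.pyGetD hs (t : Int) 0 + k) n m
             else t + 1) : Nat) : Int) 0
          - (PySem.List.pyGetD hs (t : Int) 0 + k) * ((n : Int)
            - ((if t + 1 < pvAltAdvance hs (PySem.List.pyGetD hs (t : Int) 0 + k) n m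
                then pvAltAdvance hs (PySem.List.pyGetD hs (t : Int) 0 + k) n m
                else t + 1 : Nat) : Int))) else b)))) := by
  rw [pvAltLoop.eq_def]
  rw [if_pos ht]

theorem pvLoop (hs suffix : List Int) (k : Int) (n : Nat) (hsort : hs.Pairwise (· ≤ ·))
    (hn : n = hs.length) (h1 : 1 ≤ n)
    (hsuf : ∀ e : Nat, e ≤ n → PySem.List.pyGetD suffix (e : Int) 0 = pvSuf hs e)
    (t m : Nat) (best : Option Int)
    (ht : t ≤ pvT hs k 0 (n-1))
    (hm : m ≤ n) (hminv : ∀ idx, idx < m → pvH hs idx ≤ pvH hs t + k)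
    (hbest : best = if t = 0 then none else some (pvMinR (pvG hs k 0 (n-1)) 0 (t-1))) :
    pvAltLoop hs suffix k n t (pvPre hs t) m best
      = pvMinR (pvG hs k 0 (n-1)) 0 (pvT hs k 0 (n-1)) := by
  have hTle : pvT hs k 0 (n-1) ≤ n-1 := pvT_le _ _ _ _ (by omega)
  have htn : t < n := by omega
  rw [pvAltLoop_step _ _ _ _ _ _ _ _ htn]
  rw [show PySem.List.pyGetD hs (t : Int) 0 = pvH hs t by
    rw [PySem.List.pyGetD_natCast]; rfl]
  rw [show ((n : Int) - 1) = ((n - 1 : Nat) : Int) by rw [Nat.cast_sub (by omega)]; ring]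
  rw [show PySem.List.pyGetD hs ((n - 1 : Nat) : Int) 0 = pvH hs (n-1) by
    rw [PySem.List.pyGetD_natCast]; rfl]
  obtain ⟨ha1, ha2, ha3, ha4⟩ := pvAdvance_spec hs (pvH hs t + k) n m hn hm hminv
  set m' := pvAltAdvance hs (pvH hs t + k) n m with hm'def
  set e : Nat := if t + 1 < m' then m' else t + 1 with hedef
  have he1 : t + 1 ≤ e := by rw [hedef]; split <;> omega
  have he2 : e ≤ n := by rw [hedef]; split <;> omega
  have hem : m' ≤ e := by rw [hedef]; split <;> omega
  have hc : pvPre hs t + PySem.List.pyGetD suffix (e : Int) 0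
      - (pvH hs t + k) * ((n : Int) - (e : Int)) = pvG hs k 0 (n-1) t := by
    rw [hsuf e he2]
    have hlow : ∀ s, t < s → s < e → pvH hs s ≤ pvH hs t + k := by
      intro s hsa hsb
      rcases (show e = m' ∨ e = t + 1 by rw [hedef]; split <;> simp) with hce | hce
      · exact ha3 s (by omega)
      · omega
    have hhigh : ∀ s, e ≤ s → s < hs.length → pvH hs t + k < pvH hs s := by
      intro s hsa hsb
      have hm'n : m' < n := by omega
      exact lt_of_lt_of_le (ha4 hm'n) (pvH_mono hs hsort (by omega) hsb)
    have hexc := pvExc_eq_suf hs k t e (by omega) he1 (by omega) hlow hhigh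
    rw [← hn] at hexc
    unfold pvG
    rw [show pvPre hs 0 = 0 by simp [pvPre], hexc]
    ring
  rw [hc]
  have hbv : best.elim (pvG hs k 0 (n-1) t)
      (fun b => if pvG hs k 0 (n-1) t < b then pvG hs k 0 (n-1) t else b)
      = pvMinR (pvG hs k 0 (n-1)) 0 t := by
    rcases best with _ | b
    · have ht0 : t = 0 := by
        by_contra h
        rw [if_neg h] at hbest
        simp at hbest
      subst ht0
      rfl
    · have ht0 : t ≠ 0 := by
        intro h
        rw [if_pos h] at hbest
        simp at hbest
      rw [if_neg ht0] at hbest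
      have hb : b = pvMinR (pvG hs k 0 (n-1)) 0 (t-1) := Option.some.inj hbest
      subst hb
      simp only [Option.elim_some]
      have happ := pvMinR_append (pvG hs k 0 (n-1)) 0 (t-1)
      rw [show t - 1 + 1 = t by omega, show 0 + (t-1) + 1 = t by omega] at happ
      rw [happ]
      rcases lt_or_ge (pvG hs k 0 (n-1) t) (pvMinR (pvG hs k 0 (n-1)) 0 (t-1)) with hlt | hge
      · rw [if_pos hlt, min_eq_right (by omega)]
      · rw [if_neg (by omega), min_eq_left (by omega)]
  rw [hbv]
  by_cases hbr : pvH hs (n-1) - pvH hs t ≤ k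
  · rw [if_pos hbr]
    have hTt : pvT hs k 0 (n-1) = t :=
      le_antisymm (pvT_le_of_feas hs k 0 (n-1) t (by omega) (by omega) hbr) ht
    rw [hTt]
  · rw [if_neg hbr]
    rcases eq_or_lt_of_le ht with hteq | htlt
    · -- t = pvT: the break never fires, the next call falls out of the loop
      have hTn : pvT hs k 0 (n-1) = n - 1 := by
        rcases eq_or_lt_of_le hTle with h | h
        · exact h
        · exact absurd (pvT_feas_of_lt hs k 0 (n-1) (by omega) h)
            (by rw [← hteq]; exact hbr)
      rw [pvAltLoop.eq_def, if_neg (by omega)]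
      simp only [Option.getD_some]
      rw [hteq]
    · rw [show pvPre hs t + pvH hs t = pvPre hs (t+1) from (pvPre_succ hs t).symm]
      exact pvLoop hs suffix k n hsort hn h1 hsuf (t+1) m'
        (some (pvMinR (pvG hs k 0 (n-1)) 0 t)) (by omega) ha2
        (fun idx hidx => le_trans (ha3 idx hidx)
          (by have := pvH_mono hs hsort (show t ≤ t + 1 by omega)
                (show t + 1 < hs.length by omega)
              omega))
        (by rw [if_neg (by omega)]; simp)
termination_by n - t

-- ---- port B computes the scan minimum ----
theorem portB_eq (heights : List Int) (k : Int) (hne : heights ≠ []) :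
    min_removal_dp2_alt heights k =
      pvMinR (pvG (PySem.List.sorted heights (fun x => x) false) k 0
          ((PySem.List.sorted heights (fun x => x) false).length - 1)) 0
        (pvT (PySem.List.sorted heights (fun x => x) false) k 0
          ((PySem.List.sorted heights (fun x => x) false).length - 1)) := by
  unfold min_removal_dp2_alt
  set hs := PySem.List.sorted heights (fun x => x) false with hhs
  have h1 : 1 ≤ hs.length := by
    rw [hhs, PySem.List.length_sorted]
    exact List.length_pos_iff.2 hne
  show (if hs.length = 0 then 0 else
      pvAltLoop hs ((PySem.List.pyRange ((hs.length : Int) - 1) (-1) (-1)).foldl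
        (fun suffix i => suffix.set i.toNat
          (PySem.List.pyGetD suffix (i+1) 0 + PySem.List.pyGetD hs i 0))
        (List.replicate (hs.length + 1) 0)) k hs.length 0 0 0 none)
    = pvMinR (pvG hs k 0 (hs.length - 1)) 0 (pvT hs k 0 (hs.length - 1))
  rw [if_neg (by omega), pvSufPartial_top hs, pvSufFold hs hs.length (le_refl _)]
  have hsuf : ∀ e : Nat, e ≤ hs.length →
      PySem.List.pyGetD (pvSufPartial hs 0) (e : Int) 0 = pvSuf hs e := by
    intro e he
    rw [PySem.List.pyGetD_natCast]
    unfold pvSufPartial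
    rw [pvMapRangeGetD, if_pos (by omega), if_pos (by omega)]
  have hsort : hs.Pairwise (· ≤ ·) := PySem.List.sorted_pairwise heights (fun x => x)
  have hmain := pvLoop hs (pvSufPartial hs 0) k hs.length hsort rfl h1 hsuf 0 0 none
    (Nat.zero_le _) (by omega) (by intro idx hidx; omega) (by simp)
  rw [show pvPre hs 0 = (0 : Int) by simp [pvPre]] at hmain
  exact hmain

-- ===== VERDICT (by name: the statement is the Claim_ definition above) =====
theorem min_removal_dp2_spec : Claim_equal_min_removal_dp2 := by
  intro heights k _
  unfold Spec_min_removal_dp2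
  by_cases hne : heights = []
  · subst hne
    rfl
  · have hsort : (PySem.List.sorted heights (fun x => x) false).Pairwise (· ≤ ·) :=
      PySem.List.sorted_pairwise heights (fun x => x)
    have hn1 : 1 ≤ (PySem.List.sorted heights (fun x => x) false).length := by
      rw [PySem.List.length_sorted]
      exact List.length_pos_iff.2 hne
    rw [portA_eq heights k hne, portB_eq heights k hne,
      pvC_eq _ k hsort 0 _ (by omega) (by omega)]
    simp
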